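-- pv_equiv track=rewrite | github.com/Ravi-0412/DSA-Program-And-Notes | Maths and Geometry/Maximum GCD Pair.py | MaxGcd
-- ===== SOURCE A (Python) =====
-- def MaxGcd(n, arr):
--     # Find the maximum element in the array
--     max_elem = max(arr)
--
--     # Create a frequency array to count multiples of each number
--     count = [0] * (max_elem + 1)
--
--     # Count the frequency of each element in the array
--     for num in arr:
--         count[num] += 1
--
--     # Iterate from the maximum possible GCD down to 1
--     for g in range(max_elem, 0, -1):
--         multiple_count = 0
--         # Count multiples of g
--         for multiple in range(g, max_elem + 1, g):
--             multiple_count += count[multiple]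
--         # If there are at least two multiples of g, it's the maximum GCD
--         if multiple_count >= 2:
--             return g
--
--     return 1  # If no valid GCD is found (this should not happen for valid input)
-- ===== SOURCE B (Python) =====
-- def _gcd(a, b):
--     return a if b == 0 else _gcd(b, a % b)
--
--
-- def MaxGcd(n, arr):
--     vals = [x for x in arr if x > 0]
--     best = 1
--     for i in range(len(vals)):
--         for j in range(i + 1, len(vals)):
--             g = _gcd(vals[i], vals[j])
--             if g > best:
--                 best = g
--     return best
-- ===== Notes on version B (the rewrite author's own statement) =====
-- stated objective: simpler
-- what changed: Replaces the frequency-array + descending multiple-counting sieve (allocate count[0..max], scan candidate g from max down counting its multiples) with a direct brute-force scan over all pairs of the positive entries (the only values the sieve ever counts) keeping the maximum Euclidean gcd, with best defaulting to 1.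
-- outside the precondition, e.g. on MaxGcd(2, [6, -4]): A returns 3, B returns 1; on MaxGcd(2, [9, -2, 335, 2, -1]): A returns 335, B returns 1; on MaxGcd(0, []): A raises ValueError, B returns 1
import Mathlib
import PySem

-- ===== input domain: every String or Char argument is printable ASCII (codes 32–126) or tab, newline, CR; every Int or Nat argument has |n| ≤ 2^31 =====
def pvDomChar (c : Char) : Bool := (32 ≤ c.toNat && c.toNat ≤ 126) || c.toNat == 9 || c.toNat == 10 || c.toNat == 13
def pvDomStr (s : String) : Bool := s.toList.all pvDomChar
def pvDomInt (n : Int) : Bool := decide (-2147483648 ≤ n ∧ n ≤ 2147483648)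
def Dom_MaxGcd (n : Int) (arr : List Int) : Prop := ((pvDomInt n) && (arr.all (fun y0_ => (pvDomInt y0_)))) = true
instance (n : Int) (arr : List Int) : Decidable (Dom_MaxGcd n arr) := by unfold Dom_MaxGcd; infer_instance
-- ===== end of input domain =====

-- B replaces A's frequency-array sieve over candidate gcds by a direct brute-force
-- maximum of the Euclidean gcd over all pairs i<j of the positive entries (the only
-- values A's sieve ever counts) with best defaulting to 1 (objective: simpler).

-- ===== PORT A =====
-- the 'for g in range(max_elem, 0, -1)' loop with its early return
def maxGcdLoop (count : List Int) (m : Int) (gs : List Int) : Int :=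
  match gs with
  | [] => 1
  | g :: rest =>
    let mc := (PySem.List.pyRange g (m+1) g).foldl
      (fun acc mult => acc + PySem.List.pyGetD count mult 0) 0
    if mc ≥ 2 then g else maxGcdLoop count m rest

def MaxGcd (n : Int) (arr : List Int) : Int :=
  match PySem.List.max? arr (fun x => x) with
  | none => 0  -- Python raises ValueError on max([]); excluded by Pre_MaxGcd
  | some m =>
    let count0 : List Int := List.replicate (m+1).toNat 0
    -- 'for num in arr: count[num] += 1' (pySetD/pyGetD are exact on in-range indices;
    -- out-of-range/negative indices are excluded by Pre_MaxGcd)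
    let count := arr.foldl
      (fun c num => PySem.List.pySetD c num ((PySem.List.pyGetD c num 0) + 1)) count0
    maxGcdLoop count m (PySem.List.pyRange m 0 (-1))

-- ===== PORT B =====
-- def _gcd(a, b): return a if b == 0 else _gcd(b, a % b)
def pyGcd (a b : Int) : Int :=
  if b = 0 then a else pyGcd b (PySem.Int.mod a b)
termination_by b.natAbs
decreasing_by
  rename_i h
  rcases lt_or_gt_of_ne h with hb | hb
  · have h1 := (PySem.Int.mod_neg_bounds a hb).1
    have h2 := (PySem.Int.mod_neg_bounds a hb).2
    omega
  · have h1 := PySem.Int.mod_nonneg a hb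
    have h2 := PySem.Int.mod_lt a hb
    omega

def MaxGcd_alt (n : Int) (arr : List Int) : Int :=
  let vals := arr.filter (fun x => decide (0 < x))
  (PySem.List.pyRange 0 (vals.length : Int) 1).foldl (fun best i =>
    (PySem.List.pyRange (i+1) (vals.length : Int) 1).foldl (fun best j =>
      let g := pyGcd (PySem.List.pyGetD vals i 0) (PySem.List.pyGetD vals j 0)
      if g > best then g else best) best) 1

-- ===== PRECONDITION & SPEC =====
-- Pre_ excludes the empty array (A raises ValueError on max([])) and arrays containing a
-- negative element: there A either raises IndexError (when all elements are negative or one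
-- is below -(max+1)) or returns a value produced by Python's negative-index wraparound
-- (count[x] silently hits count[max+1+x]) — an accident of A's implementation.
def Pre_MaxGcd (n : Int) (arr : List Int) : Prop := arr ≠ [] ∧ ∀ x ∈ arr, 0 ≤ x
instance (n : Int) (arr : List Int) : Decidable (Pre_MaxGcd n arr) := by
  unfold Pre_MaxGcd; infer_instance

def pvWitness_MaxGcd : Int × List Int := (3, [6, 4, 10])

def Spec_MaxGcd (n : Int) (arr : List Int) (out : Int) : Prop := out = MaxGcd_alt n arr
instance (n : Int) (arr : List Int) (out : Int) : Decidable (Spec_MaxGcd n arr out) := by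
  unfold Spec_MaxGcd; infer_instance

-- ===== CLAIM (what is proved, stated in full; the proofs are below) =====
def Claim_equal_MaxGcd : Prop := ∀ (n : Int) (arr : List Int), Dom_MaxGcd n arr → Pre_MaxGcd n arr → Spec_MaxGcd n arr (MaxGcd n arr)

-- ===== LEMMAS AND PROOFS =====

-- gcd b (a % b) = gcd a b (Euclid's step, ediv/emod version)
theorem int_gcd_step (a b : Int) : Int.gcd b (a % b) = Int.gcd a b := by
  apply Nat.dvd_antisymm
  · apply Int.dvd_gcd
    · have h1 : ((Int.gcd b (a % b) : Int)) ∣ b := Int.gcd_dvd_left b (a % b)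
      have h2 : ((Int.gcd b (a % b) : Int)) ∣ a % b := Int.gcd_dvd_right b (a % b)
      have := Int.emod_add_ediv a b
      calc ((Int.gcd b (a % b) : Int)) ∣ a % b + b * (a / b) := dvd_add h2 (Dvd.dvd.mul_right h1 _)
        _ = a := this
    · exact Int.gcd_dvd_left b (a % b)
  · apply Int.dvd_gcd
    · exact Int.gcd_dvd_right a b
    · have h1 : ((Int.gcd a b : Int)) ∣ a := Int.gcd_dvd_left a b
      have h2 : ((Int.gcd a b : Int)) ∣ b := Int.gcd_dvd_right a b
      rw [Int.emod_def]
      exact dvd_sub h1 (Dvd.dvd.mul_right h2 _)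

theorem pyGcd_eq_gcd (a b : Int) (ha : 0 ≤ a) (hb : 0 ≤ b) :
    pyGcd a b = (Int.gcd a b : Int) := by
  rw [pyGcd]
  split
  · rename_i h; subst h
    simp [Int.gcd, Int.natAbs_of_nonneg ha]
  · rename_i h
    have hbp : 0 < b := lt_of_le_of_ne hb (Ne.symm h)
    rw [PySem.Int.mod_eq_emod_of_pos hbp]
    have hmn : 0 ≤ a % b := Int.emod_nonneg a h
    have := pyGcd_eq_gcd b (a % b) hb hmn
    rw [this, int_gcd_step]
termination_by b.natAbs
decreasing_by
  have h1 : 0 ≤ a % b := Int.emod_nonneg a (by assumption)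
  have h2 : a % b < b := Int.emod_lt_of_pos a (by omega)
  omega

-- reading a cons at index i+1 (0 ≤ i) skips the head
theorem pyGetD_cons_succ (x : Int) (t : List Int) (i : Int) (h : 0 ≤ i) :
    PySem.List.pyGetD (x :: t) (i + 1) 0 = PySem.List.pyGetD t i 0 := by
  obtain ⟨k, rfl⟩ := Int.eq_ofNat_of_zero_le h
  have : ((k : Int) + 1) = ((k + 1 : Nat) : Int) := by push_cast; ring
  rw [this, PySem.List.pyGetD_natCast, PySem.List.pyGetD_natCast]
  rfl

theorem pyGetD_cons_zero (x : Int) (t : List Int) :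
    PySem.List.pyGetD (x :: t) 0 0 = x := by
  have h0 : (0 : Int) = ((0 : Nat) : Int) := rfl
  rw [h0, PySem.List.pyGetD_natCast]; rfl

theorem pyGetD_mem (l : List Int) (i : Int) (h0 : 0 ≤ i) (h1 : i < l.length) :
    PySem.List.pyGetD l i 0 ∈ l := by
  obtain ⟨k, rfl⟩ := Int.eq_ofNat_of_zero_le h0
  rw [PySem.List.pyGetD_natCast]
  have hk : k < l.length := by exact_mod_cast h1
  rw [List.getD_eq_getElem l 0 hk]
  exact List.getElem_mem hk

-- ===== B-side characterization: MaxGcd_alt = foldl max 1 over the list of pair gcds =====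
def allGcds (arr : List Int) : List Int :=
  (PySem.List.pyRange 0 (arr.length : Int) 1).flatMap (fun i =>
    (PySem.List.pyRange (i+1) (arr.length : Int) 1).map (fun j =>
      pyGcd (PySem.List.pyGetD arr i 0) (PySem.List.pyGetD arr j 0)))

theorem foldl_if_gt_eq_max (l : List Int) (f : Int → Int) (a : Int) :
    l.foldl (fun b x => if f x > b then f x else b) a = (l.map f).foldl max a := by
  induction l generalizing a with
  | nil => rfl
  | cons x t ih =>
    simp only [List.foldl_cons, List.map_cons]
    rw [ih]
    congr 1
    rcases le_or_gt (f x) a with h | h <;> simp [max_def] <;> omega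

theorem foldl_foldl_max (ls : List (List Int)) (a : Int) :
    ls.foldl (fun b l => l.foldl max b) a = ls.flatten.foldl max a := by
  induction ls generalizing a with
  | nil => rfl
  | cons l t ih => simp only [List.foldl_cons, List.flatten_cons, List.foldl_append, ih]

theorem brute_eq_foldl_max (l : List Int) :
    (PySem.List.pyRange 0 (l.length : Int) 1).foldl (fun best i =>
      (PySem.List.pyRange (i+1) (l.length : Int) 1).foldl (fun best j =>
        let g := pyGcd (PySem.List.pyGetD l i 0) (PySem.List.pyGetD l j 0)
        if g > best then g else best) best) 1
    = (allGcds l).foldl max 1 := by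
  unfold allGcds
  rw [show (fun (best i : Int) =>
        (PySem.List.pyRange (i+1) (l.length : Int) 1).foldl
          (fun best j => let g := pyGcd (PySem.List.pyGetD l i 0) (PySem.List.pyGetD l j 0);
            if g > best then g else best) best)
      = (fun (best i : Int) =>
        ((PySem.List.pyRange (i+1) (l.length : Int) 1).map
          (fun j => pyGcd (PySem.List.pyGetD l i 0) (PySem.List.pyGetD l j 0))).foldl max best)
    from funext fun best => funext fun i => foldl_if_gt_eq_max _ _ best]
  rw [← List.foldl_map (f := fun i => (PySem.List.pyRange (i+1) (l.length : Int) 1).map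
      (fun j => pyGcd (PySem.List.pyGetD l i 0) (PySem.List.pyGetD l j 0)))
      (g := fun b l => l.foldl max b)]
  rw [foldl_foldl_max, List.flatMap_def]

theorem alt_eq_foldl_max (n : Int) (arr : List Int) :
    MaxGcd_alt n arr = (allGcds (arr.filter (fun x => decide (0 < x)))).foldl max 1 :=
  brute_eq_foldl_max _

theorem mem_allGcds (arr : List Int) (y : Int) :
    y ∈ allGcds arr ↔ ∃ i j : Int, 0 ≤ i ∧ i < j ∧ j < (arr.length : Int) ∧
      y = pyGcd (PySem.List.pyGetD arr i 0) (PySem.List.pyGetD arr j 0) := by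
  unfold allGcds
  simp only [List.mem_flatMap, List.mem_map, PySem.List.mem_pyRange_one]
  constructor
  · rintro ⟨i, ⟨hi0, hil⟩, j, ⟨hij, hjl⟩, rfl⟩
    exact ⟨i, j, hi0, by omega, hjl, rfl⟩
  · rintro ⟨i, j, hi0, hij, hjl, rfl⟩
    exact ⟨i, ⟨hi0, by omega⟩, j, ⟨by omega, hjl⟩, rfl⟩

-- ===== count-array correctness =====
theorem build_get (arr : List Int) (c : List Int)
    (hb : ∀ x ∈ arr, 0 ≤ x ∧ x < (c.length : Int)) (v : Nat) (hv : v < c.length) :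
    PySem.List.pyGetD
      (arr.foldl (fun c num => PySem.List.pySetD c num ((PySem.List.pyGetD c num 0) + 1)) c)
      (v : Int) 0
    = PySem.List.pyGetD c (v : Int) 0 + (arr.count (v : Int) : Int) := by
  induction arr generalizing c with
  | nil => simp
  | cons x t ih =>
    obtain ⟨hx0, hxl⟩ := hb x (List.mem_cons_self)
    obtain ⟨k, rfl⟩ := Int.eq_ofNat_of_zero_le hx0
    have hkl : k < c.length := by exact_mod_cast hxl
    simp only [List.foldl_cons]
    rw [ih (PySem.List.pySetD c (k : Int) (PySem.List.pyGetD c (k : Int) 0 + 1))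
      (by intro y hy; rw [PySem.List.length_pySetD]; exact hb y (List.mem_cons_of_mem _ hy))
      (by rw [PySem.List.length_pySetD]; exact hv)]
    rw [PySem.List.pyGetD_pySetD_natCast c k v _ 0 hkl]
    have hcount : ((k : Int) :: t).count (v : Int) = t.count (v : Int) + if (k : Int) = (v : Int) then 1 else 0 := by
      rw [List.count_cons]; simp
    rw [hcount]
    by_cases hkv : v = k
    · subst hkv; simp; ring
    · have : ¬ ((k : Int) = (v : Int)) := by exact_mod_cast fun h => hkv (by omega)
      simp [hkv, this]

theorem replicate_get (k v : Nat) (hv : v < k) :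
    PySem.List.pyGetD (List.replicate k (0 : Int)) (v : Int) 0 = 0 := by
  rw [PySem.List.pyGetD_natCast]
  simp [List.getD]

-- Σ_{v ∈ L} arr.count v = number of elements of arr lying in L (L without duplicates)
theorem sum_count_eq_countP (L : List Int) (hL : L.Nodup) (arr : List Int) :
    (L.map (fun v => (arr.count v : Int))).sum
      = (arr.countP (fun x => decide (x ∈ L)) : Int) := by
  induction arr with
  | nil => simp
  | cons x t ih =>
    have hmap : (L.map (fun v => ((x :: t).count v : Int)))
        = L.map (fun v => (t.count v : Int) + (if (decide (x = v) : Bool) then 1 else 0)) := by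
      apply List.map_congr_left
      intro v _
      rw [List.count_cons]
      by_cases h : x = v <;> simp [h]
    rw [hmap, PySem.List.sum_map_add_int, ih, PySem.List.sum_map_ite_one_zero]
    have hcnt : L.countP (fun v => decide (x = v)) = L.count x := by
      rw [List.count_eq_countP]; apply List.countP_congr; intro v _
      by_cases h : x = v
      · subst h; simp
      · simp [h, Ne.symm h]
    rw [hcnt, hL.count]
    rw [List.countP_cons]
    by_cases hx : x ∈ L <;> simp [hx]

theorem maxGcdLoop_nil (count : List Int) (m : Int) : maxGcdLoop count m [] = 1 := rfl

theorem maxGcdLoop_cons (count : List Int) (m g : Int) (rest : List Int) :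
    maxGcdLoop count m (g :: rest) =
      if 2 ≤ (PySem.List.pyRange g (m+1) g).foldl
          (fun acc mult => acc + PySem.List.pyGetD count mult 0) 0
      then g else maxGcdLoop count m rest := rfl

-- ===== the descending loop: first g with ≥ 2 multiples =====
theorem loopSpec (count : List Int) (m : Int) :
    ∀ (k : Nat) (a : Int), a = (k : Int) →
    1 ≤ maxGcdLoop count m (PySem.List.pyRange a 0 (-1)) ∧
    (maxGcdLoop count m (PySem.List.pyRange a 0 (-1)) = 1 ∨
      (maxGcdLoop count m (PySem.List.pyRange a 0 (-1)) ≤ a ∧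
        2 ≤ (PySem.List.pyRange (maxGcdLoop count m (PySem.List.pyRange a 0 (-1))) (m+1)
              (maxGcdLoop count m (PySem.List.pyRange a 0 (-1)))).foldl
            (fun acc mult => acc + PySem.List.pyGetD count mult 0) 0)) ∧
    (∀ g, maxGcdLoop count m (PySem.List.pyRange a 0 (-1)) < g → g ≤ a →
      ¬ (2 ≤ (PySem.List.pyRange g (m+1) g).foldl
            (fun acc mult => acc + PySem.List.pyGetD count mult 0) 0)) := by
  intro k
  induction k with
  | zero =>
    intro a ha; subst ha
    rw [PySem.List.pyRange_neg_one_eq_nil (by simp), maxGcdLoop_nil]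
    refine ⟨le_refl 1, Or.inl rfl, ?_⟩
    intro g h1 h2 _; omega
  | succ k ih =>
    intro a ha; subst ha
    rw [PySem.List.pyRange_neg_one_cons (by exact_mod_cast Nat.succ_pos k), maxGcdLoop_cons]
    by_cases hc : 2 ≤ (PySem.List.pyRange ((k+1 : Nat) : Int) (m+1) ((k+1 : Nat) : Int)).foldl
        (fun acc mult => acc + PySem.List.pyGetD count mult 0) 0
    · rw [if_pos hc]
      refine ⟨by exact_mod_cast Nat.succ_pos k, Or.inr ⟨le_refl _, hc⟩, ?_⟩
      intro g h1 h2 _; omega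
    · rw [if_neg hc]
      have hstep : ((k+1 : Nat) : Int) - 1 = (k : Int) := by push_cast; ring
      rw [hstep]
      obtain ⟨ih1, ih2, ih3⟩ := ih (k : Int) rfl
      refine ⟨ih1, ?_, ?_⟩
      · rcases ih2 with h | ⟨hle, hP⟩
        · exact Or.inl h
        · exact Or.inr ⟨by omega, hP⟩
      · intro g hg1 hg2
        by_cases hgk : g ≤ (k : Int)
        · exact ih3 g hg1 hgk
        · have : g = ((k+1 : Nat) : Int) := by push_cast at hg2 ⊢; omega
          rw [this]; exact hc

-- two witnesses at distinct positions from countP ≥ 2, and back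
theorem countP_pos_exists (p : Int → Bool) (l : List Int) (h : 1 ≤ l.countP p) :
    ∃ i : Int, 0 ≤ i ∧ i < (l.length : Int) ∧ p (PySem.List.pyGetD l i 0) := by
  have : ∃ a ∈ l, p a := List.countP_pos_iff.mp (by omega)
  obtain ⟨a, ha, hpa⟩ := this
  obtain ⟨k, hk, rfl⟩ := List.mem_iff_getElem.mp ha
  refine ⟨(k : Int), by positivity, by exact_mod_cast hk, ?_⟩
  rw [PySem.List.pyGetD_natCast, List.getD_eq_getElem l 0 hk]
  exact hpa

theorem countP_two_exists (p : Int → Bool) (l : List Int) (h : 2 ≤ l.countP p) :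
    ∃ i j : Int, 0 ≤ i ∧ i < j ∧ j < (l.length : Int) ∧
      p (PySem.List.pyGetD l i 0) ∧ p (PySem.List.pyGetD l j 0) := by
  induction l with
  | nil => simp [List.countP_nil] at h
  | cons x t ih =>
    rw [List.countP_cons] at h
    by_cases hx : p x
    · have ht : 1 ≤ t.countP p := by rw [if_pos hx] at h; omega
      obtain ⟨i, hi0, hil, hpi⟩ := countP_pos_exists p t ht
      have hlen : i + 1 < ((x :: t).length : Int) := by simp; omega
      refine ⟨0, i + 1, le_refl 0, by omega, hlen, ?_, ?_⟩
      · rw [pyGetD_cons_zero]; exact hx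
      · rw [pyGetD_cons_succ x t i hi0]; exact hpi
    · have ht : 2 ≤ t.countP p := by rw [if_neg hx] at h; omega
      obtain ⟨i, j, hi0, hij, hjl, hpi, hpj⟩ := ih ht
      have hlen : j + 1 < ((x :: t).length : Int) := by simp at hjl ⊢; omega
      refine ⟨i + 1, j + 1, by omega, by omega, hlen, ?_, ?_⟩
      · rw [pyGetD_cons_succ x t i hi0]; exact hpi
      · rw [pyGetD_cons_succ x t j (by omega)]; exact hpj

theorem countP_two_of (p : Int → Bool) (l : List Int) (i j : Int)
    (hi0 : 0 ≤ i) (hij : i < j) (hjl : j < (l.length : Int))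
    (hpi : p (PySem.List.pyGetD l i 0)) (hpj : p (PySem.List.pyGetD l j 0)) :
    2 ≤ l.countP p := by
  induction l generalizing i j with
  | nil => simp at hjl; omega
  | cons x t ih =>
    rw [List.countP_cons]
    by_cases hi : i = 0
    · subst hi
      have hx : p x := by rwa [pyGetD_cons_zero] at hpi
      have hj' : j = (j - 1) + 1 := by omega
      rw [hj', pyGetD_cons_succ x t (j - 1) (by omega)] at hpj
      have ht : 1 ≤ t.countP p := by
        have hmem : PySem.List.pyGetD t (j - 1) 0 ∈ t := by
          apply pyGetD_mem t (j - 1) (by omega)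
          simp at hjl ⊢; omega
        have := List.countP_pos_iff.mpr ⟨_, hmem, hpj⟩
        omega
      rw [if_pos hx]; omega
    · have hi' : i = (i - 1) + 1 := by omega
      have hj' : j = (j - 1) + 1 := by omega
      rw [hi', pyGetD_cons_succ x t (i - 1) (by omega)] at hpi
      rw [hj', pyGetD_cons_succ x t (j - 1) (by omega)] at hpj
      have := ih (i - 1) (j - 1) (by omega) (by omega) (by simp at hjl ⊢; omega) hpi hpj
      split <;> omega

-- ===== VERDICT (by name: the statement is the Claim_ definition above) =====
theorem MaxGcd_spec : Claim_equal_MaxGcd := by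
  intro n arr _hdom hpre
  obtain ⟨hne, hpos⟩ := hpre
  unfold Spec_MaxGcd
  cases hmax : PySem.List.max? arr (fun x => x) with
  | none => exact absurd ((PySem.List.max?_eq_none_iff arr _).mp hmax) hne
  | some m =>
  have hub : ∀ x ∈ arr, x ≤ m := PySem.List.max?_isMax hmax
  have hm0 : 0 ≤ m := hpos m (PySem.List.max?_mem hmax)
  -- the positive entries, the only values either program ever combines
  set vals := arr.filter (fun x => decide (0 < x)) with hvals
  have hval : ∀ x ∈ vals, 1 ≤ x ∧ x ≤ m := by
    intro x hx
    rw [hvals, List.mem_filter] at hx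
    obtain ⟨hxa, hx1⟩ := hx
    exact ⟨by simpa using hx1, hub x hxa⟩
  -- the count array
  set count := arr.foldl
      (fun c num => PySem.List.pySetD c num ((PySem.List.pyGetD c num 0) + 1))
      (List.replicate (m+1).toNat (0:Int)) with hcount
  -- the multiple-count of any 1 ≤ g ≤ m is the number of positive entries divisible by g
  have hmc : ∀ g : Int, 1 ≤ g → g ≤ m →
      (PySem.List.pyRange g (m+1) g).foldl
        (fun acc mult => acc + PySem.List.pyGetD count mult 0) 0
      = (vals.countP (fun x => decide (g ∣ x)) : Int) := by
    intro g hg1 hgm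
    rw [PySem.List.foldl_add, zero_add]
    have hnodup : (PySem.List.pyRange g (m+1) g).Nodup := by
      rw [PySem.List.pyRange_of_pos _ _ (by omega)]
      apply List.Nodup.map
      · intro k1 k2 hk; simp at hk; omega
      · exact List.nodup_range
    have hread : ∀ mult ∈ PySem.List.pyRange g (m+1) g,
        PySem.List.pyGetD count mult 0 = (vals.count mult : Int) := by
      intro mult hmem
      rw [PySem.List.mem_pyRange_iff_of_pos (by omega)] at hmem
      obtain ⟨hge, hlt, _⟩ := hmem
      have h0 : 0 ≤ mult := by omega
      obtain ⟨v, rfl⟩ := Int.eq_ofNat_of_zero_le h0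
      have hv : v < (List.replicate (m+1).toNat (0:Int)).length := by
        rw [List.length_replicate]; omega
      rw [hcount, build_get arr _ ?_ v hv, replicate_get _ v (by simpa using hv), zero_add]
      · congr 1
        rw [hvals, List.count_filter (by simp only [decide_eq_true_eq]; exact_mod_cast (by omega : (0:Int) < (v:Int)))]
      · intro x hx
        rw [List.length_replicate]
        have := hpos x hx; have := hub x hx
        constructor <;> omega
    rw [List.map_congr_left hread, sum_count_eq_countP _ hnodup]
    congr 1
    apply List.countP_congr
    intro x hx
    obtain ⟨hx1, hxm⟩ := hval x hx
    simp only [PySem.List.mem_pyRange_iff_of_pos (show (0:Int) < g by omega), decide_eq_true_eq]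
    constructor
    · rintro ⟨_, _, hdvd⟩
      have : g ∣ (x - g) + g := dvd_add hdvd dvd_rfl
      simpa using this
    · intro hdvd
      exact ⟨Int.le_of_dvd (by omega) hdvd, by omega, dvd_sub hdvd dvd_rfl⟩
  -- A's loop
  obtain ⟨hr1, hr2, hr3⟩ := loopSpec count m m.toNat m (by omega)
  set r := maxGcdLoop count m (PySem.List.pyRange m 0 (-1)) with hrdef
  -- B's fold
  rw [alt_eq_foldl_max]
  set s := (allGcds vals).foldl max 1 with hsdef
  have hs1 : 1 ≤ s := (PySem.List.le_foldl_max (allGcds vals) 1).1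
  have hsub : ∀ y ∈ allGcds vals, y ≤ s := (PySem.List.le_foldl_max (allGcds vals) 1).2
  -- every indexed entry of vals is between 1 and m
  have hget : ∀ i : Int, 0 ≤ i → i < (vals.length : Int) →
      1 ≤ PySem.List.pyGetD vals i 0 ∧ PySem.List.pyGetD vals i 0 ≤ m := by
    intro i h0 h1
    exact hval _ (pyGetD_mem vals i h0 (by exact_mod_cast h1))
  show MaxGcd n arr = s
  have hA : MaxGcd n arr = r := by
    unfold MaxGcd; rw [hmax]
  rw [hA]
  apply le_antisymm
  · -- r ≤ s
    rcases hr2 with hone | ⟨hrm, hP⟩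
    · omega
    · rw [hmc r hr1 hrm] at hP
      have hP' : 2 ≤ vals.countP (fun x => decide (r ∣ x)) := by exact_mod_cast hP
      obtain ⟨i, j, hi0, hij, hjl, hpi, hpj⟩ := countP_two_exists _ vals hP'
      set ai := PySem.List.pyGetD vals i 0
      set aj := PySem.List.pyGetD vals j 0
      have hdvdi : r ∣ ai := by simpa using hpi
      have hdvdj : r ∣ aj := by simpa using hpj
      have hai := hget i hi0 (by omega)
      have haj := hget j (by omega) hjl
      have hmem : pyGcd ai aj ∈ allGcds vals :=
        (mem_allGcds vals _).mpr ⟨i, j, hi0, hij, hjl, rfl⟩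
      have hle : pyGcd ai aj ≤ s := hsub _ hmem
      have hgcd : pyGcd ai aj = (Int.gcd ai aj : Int) := pyGcd_eq_gcd ai aj (by omega) (by omega)
      have hrdvd : r ∣ (Int.gcd ai aj : Int) := by
        have : r.toNat ∣ Int.gcd ai aj := by
          apply Int.dvd_gcd
          · rwa [Int.toNat_of_nonneg (by omega)]
          · rwa [Int.toNat_of_nonneg (by omega)]
        have h2 := Int.natCast_dvd_natCast.mpr this
        rwa [Int.toNat_of_nonneg (by omega)] at h2
      have hpos' : 0 < (Int.gcd ai aj : Int) := by
        rcases Nat.eq_zero_or_pos (Int.gcd ai aj) with h | h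
        · rw [Int.gcd_eq_zero_iff] at h; omega
        · exact_mod_cast h
      have := Int.le_of_dvd hpos' hrdvd
      omega
  · -- s ≤ r
    rcases PySem.List.foldl_max_mem (allGcds vals) 1 with h1 | hmem
    · omega
    · obtain ⟨i, j, hi0, hij, hjl, hseq⟩ := (mem_allGcds vals s).mp hmem
      set ai := PySem.List.pyGetD vals i 0
      set aj := PySem.List.pyGetD vals j 0
      have hai := hget i hi0 (by omega)
      have haj := hget j (by omega) hjl
      have hgcd : pyGcd ai aj = (Int.gcd ai aj : Int) := pyGcd_eq_gcd ai aj (by omega) (by omega)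
      have hdl : (Int.gcd ai aj : Int) ∣ ai := Int.gcd_dvd_left ai aj
      have hdr : (Int.gcd ai aj : Int) ∣ aj := Int.gcd_dvd_right ai aj
      have hpos' : 0 < (Int.gcd ai aj : Int) := by
        rcases Nat.eq_zero_or_pos (Int.gcd ai aj) with h | h
        · rw [Int.gcd_eq_zero_iff] at h; omega
        · exact_mod_cast h
      have hsm : s ≤ m := by
        have := Int.le_of_dvd (by omega) hdl
        omega
      have hcnt : 2 ≤ vals.countP (fun x => decide (s ∣ x)) := by
        apply countP_two_of _ vals i j hi0 hij hjl
        · simp only [decide_eq_true_eq]; rw [hseq, hgcd]; exact hdl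
        · simp only [decide_eq_true_eq]; rw [hseq, hgcd]; exact hdr
      by_contra hlt
      rw [not_le] at hlt
      apply hr3 s hlt hsm
      rw [hmc s (by omega) hsm]
      exact_mod_cast hcnt
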